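-- pv_equiv track=rewrite | github.com/neilneil2000/advent-of-code-2025 | day6/day6.py | chunk_numbers_into_problems
-- ===== SOURCE A (Python) =====
-- def chunk_numbers_into_problems(numbers):
--     problems = []
--     current = []
--     for number in numbers:
--         if not all(x == " " for x in number):
--             current.append(number)
--         else:
--             problems.append(current)
--             current = []
--     else:
--         problems.append(current)
--     return problems
-- ===== SOURCE B (Python) =====
-- def chunk_numbers_into_problems(numbers):
--     # Split at each all-spaces (or empty) string by scanning for the next
--     # separator index and slicing, instead of accumulating a current chunk.
--     problems = []
--     pos = 0
--     n = len(numbers)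
--     while True:
--         j = pos
--         while j < n and not all(c == " " for c in numbers[j]):
--             j += 1
--         if j == n:
--             problems.append(numbers[pos:])
--             return problems
--         problems.append(numbers[pos:j])
--         pos = j + 1
-- ===== Notes on version B (the rewrite author's own statement) =====
-- stated objective: alternative
-- what changed: A accumulates a running current chunk element by element; B scans for the index of the next all-spaces separator and slices each chunk out of the list, carrying only a start position.
import Mathlib
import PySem

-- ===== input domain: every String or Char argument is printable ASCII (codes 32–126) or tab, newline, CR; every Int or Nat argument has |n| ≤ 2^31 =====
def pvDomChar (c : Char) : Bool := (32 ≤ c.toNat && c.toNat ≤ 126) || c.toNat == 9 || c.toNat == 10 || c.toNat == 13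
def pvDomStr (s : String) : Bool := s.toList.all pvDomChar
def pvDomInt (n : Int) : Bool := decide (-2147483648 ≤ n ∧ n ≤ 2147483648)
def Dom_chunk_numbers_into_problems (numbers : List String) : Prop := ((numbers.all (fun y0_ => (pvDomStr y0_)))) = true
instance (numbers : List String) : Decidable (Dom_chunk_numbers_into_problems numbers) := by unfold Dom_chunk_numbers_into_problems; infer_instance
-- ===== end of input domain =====

-- B scans for the next separator index and slices chunks out, instead of A's
-- accumulating a running `current` chunk: a different decomposition (alternative), same cost.

-- ===== PORT A =====
-- A: one fold carrying (problems, current); the for/else appends current at the end.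
def chunk_numbers_into_problems (numbers : List String) : List (List String) :=
  let st := numbers.foldl
    (fun (st : List (List String) × List String) number =>
      if !(number.toList.all (fun x => x == ' ')) then (st.1, st.2 ++ [number])
      else (st.1 ++ [st.2], []))
    (([] : List (List String)), ([] : List String))
  st.1 ++ [st.2]

-- ===== PORT B =====
-- B: each outer while-iteration finds the first separator in the remaining
-- suffix (the inner `while j < n` scan = findIdx?) and slices the chunk off
-- (numbers[pos:j] = take of the suffix, numbers[pos:] = the suffix itself;
-- exact, since 0 ≤ pos ≤ j ≤ n). The remaining suffix is `drop (i+1)`.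
def chunk_numbers_into_problems_alt (numbers : List String) : List (List String) :=
  match h : numbers.findIdx? (fun s => s.toList.all (fun c => c == ' ')) with
  | none => [numbers]
  | some i => numbers.take i :: chunk_numbers_into_problems_alt (numbers.drop (i + 1))
termination_by numbers.length
decreasing_by
  have hlt : i < numbers.length := by
    have := List.findIdx?_eq_some_iff_findIdx_eq.mp h
    omega
  simp [List.length_drop]
  omega

-- ===== PRECONDITION & SPEC =====
def Spec_chunk_numbers_into_problems (numbers : List String) (out : List (List String)) : Prop := out = chunk_numbers_into_problems_alt numbers
instance (numbers : List String) (out : List (List String)) : Decidable (Spec_chunk_numbers_into_problems numbers out) := by unfold Spec_chunk_numbers_into_problems; infer_instance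

-- ===== CLAIM (what is proved, stated in full; the proofs are below) =====
def Claim_equal_chunk_numbers_into_problems : Prop := ∀ (numbers : List String), Dom_chunk_numbers_into_problems numbers → Spec_chunk_numbers_into_problems numbers (chunk_numbers_into_problems numbers)

-- ===== LEMMAS AND PROOFS =====

-- prepend `cur` onto the head chunk
def pvConsHead (cur : List String) : List (List String) → List (List String)
  | [] => [cur]
  | h :: t => (cur ++ h) :: t

theorem alt_ne_nil (l : List String) : chunk_numbers_into_problems_alt l ≠ [] := by
  rw [chunk_numbers_into_problems_alt]
  cases h : l.findIdx? (fun s => s.toList.all (fun c => c == ' ')) <;> simp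

theorem consHead_nil_alt (l : List String) :
    pvConsHead [] (chunk_numbers_into_problems_alt l) = chunk_numbers_into_problems_alt l := by
  cases h : chunk_numbers_into_problems_alt l with
  | nil => exact absurd h (alt_ne_nil l)
  | cons a t => simp [pvConsHead]

theorem fold_eq_alt (l : List String) : ∀ (ps : List (List String)) (cur : List String),
    (l.foldl
        (fun (st : List (List String) × List String) number =>
          if !(number.toList.all (fun x => x == ' ')) then (st.1, st.2 ++ [number])
          else (st.1 ++ [st.2], []))
        (ps, cur)).1 ++
      [(l.foldl
        (fun (st : List (List String) × List String) number =>
          if !(number.toList.all (fun x => x == ' ')) then (st.1, st.2 ++ [number])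
          else (st.1 ++ [st.2], []))
        (ps, cur)).2] = ps ++ pvConsHead cur (chunk_numbers_into_problems_alt l) := by
  induction l with
  | nil =>
    intro ps cur
    simp [chunk_numbers_into_problems_alt, pvConsHead]
  | cons x xs ih =>
    intro ps cur
    rw [chunk_numbers_into_problems_alt]
    by_cases hx : (x.toList.all (fun c => c == ' ')) = true
    · simp only [List.foldl_cons, hx, Bool.not_true, Bool.false_eq_true, if_false]
      rw [ih, consHead_nil_alt, List.findIdx?_cons]
      split
      · rename_i heq
        rw [hx] at heq
        simp at heq
      · rename_i i heq
        rw [hx] at heq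
        simp at heq
        subst heq
        simp [pvConsHead]
    · simp only [Bool.not_eq_true] at hx
      simp only [List.foldl_cons, hx, Bool.not_false, if_true]
      rw [ih, List.findIdx?_cons]
      split
      · rename_i heq
        rw [hx, if_neg (by simp), Option.map_eq_none_iff] at heq
        have hxs : chunk_numbers_into_problems_alt xs = [xs] := by
          rw [chunk_numbers_into_problems_alt]; split <;> simp_all
        rw [hxs]
        simp [pvConsHead]
      · rename_i i heq
        rw [hx, if_neg (by simp), Option.map_eq_some_iff] at heq
        obtain ⟨j, hj, rfl⟩ := heq
        have hxs : chunk_numbers_into_problems_alt xs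
            = xs.take j :: chunk_numbers_into_problems_alt (xs.drop (j + 1)) := by
          rw [chunk_numbers_into_problems_alt]; split <;> simp_all
        rw [hxs]
        simp [pvConsHead, List.take_succ_cons, List.drop_succ_cons]

-- ===== VERDICT (by name: the statement is the Claim_ definition above) =====
theorem chunk_numbers_into_problems_spec : Claim_equal_chunk_numbers_into_problems := by
  intro numbers _
  unfold Spec_chunk_numbers_into_problems chunk_numbers_into_problems
  rw [fold_eq_alt]
  simp [consHead_nil_alt]
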